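-- pv_equiv track=rewrite | github.com/lambricm/School-Docs | Natural Language Processing/read_data.py | get_hashtag_dict
-- ===== SOURCE A (Python) =====
-- def get_hashtag_dict(data):
-- 	hashtag_dict = {}
--
-- 	for id in data:
--
-- 		#get values
-- 		target = data[id][0]
-- 		hashtags = data[id][2]
-- 		stance = data[id][4]
--
-- 		if len(hashtags) == 0:
-- 			hashtags = {"NONE"}
--
-- 		for ht in hashtags:
-- 			if not ht in hashtag_dict:
-- 				#add new postagged_word : stance_array entry
-- 				hashtag_dict[ht] = {}
--
-- 			if not target in hashtag_dict[ht]: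
-- 				hashtag_dict[ht][target] = {}
--
-- 			if not stance in hashtag_dict[ht][target]:
-- 				hashtag_dict[ht][target][stance] = 0
--
-- 			#increment for which favor
-- 			hashtag_dict[ht][target][stance] += 1
--
-- 	return hashtag_dict
-- ===== SOURCE B (Python) =====
-- def get_hashtag_dict(data):
--     # Pass 1: flatten to (hashtag, target, stance) triples (empty hashtags -> {"NONE"}).
--     triples = []
--     for id in data:
--         row = data[id]
--         hashtags = row[2] if len(row[2]) > 0 else {"NONE"}
--         for ht in hashtags:
--             triples.append((ht, row[0], row[4]))
--     # Pass 2: count the triples flat.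
--     counts = {}
--     for t in triples:
--         counts[t] = counts.get(t, 0) + 1
--     # Pass 3: reshape the flat counter into the 3-level nested dict.
--     nested = {}
--     for (ht, target, stance), c in counts.items():
--         nested.setdefault(ht, {}).setdefault(target, {})[stance] = c
--     return nested
-- ===== Notes on version B (the rewrite author's own statement) =====
-- stated objective: alternative
-- what changed: A builds the 3-level nested dict incrementally inside the scan loop; B first flattens the data to a list of (hashtag,target,stance) triples, counts them in one flat counter dict, and then reshapes the counter into the nested dict in a separate pass. Pre_ excludes rows shorter than 5 entries (A raises IndexError there) and association lists with duplicate keys (they represent no Python dict).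
import Mathlib
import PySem

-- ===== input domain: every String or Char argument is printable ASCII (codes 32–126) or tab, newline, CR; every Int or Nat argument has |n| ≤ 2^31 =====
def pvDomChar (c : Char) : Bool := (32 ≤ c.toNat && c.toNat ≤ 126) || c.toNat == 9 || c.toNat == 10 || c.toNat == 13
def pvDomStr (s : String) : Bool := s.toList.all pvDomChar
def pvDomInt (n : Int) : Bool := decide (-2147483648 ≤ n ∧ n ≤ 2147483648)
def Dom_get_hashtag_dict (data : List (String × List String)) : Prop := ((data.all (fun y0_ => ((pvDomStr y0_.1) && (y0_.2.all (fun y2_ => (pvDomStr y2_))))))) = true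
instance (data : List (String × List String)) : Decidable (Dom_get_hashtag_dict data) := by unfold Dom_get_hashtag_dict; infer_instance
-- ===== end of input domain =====

-- B replaces A's incremental nested-dict build by flatten → flat counter → reshape (same cost; 'alternative').
-- 'data' is a Python dict (association list, insertion order); A mutates nothing, only the return value is compared.

-- ===== PORT A =====
-- literal transliteration of A; 'for ht in hashtags' iterates the CHARACTERS of the string data[id][2]
def get_hashtag_dict (data : List (String × List String)) : List (String × List (String × List (String × Int))) :=
  let d : PySem.Dict String (List String) := PySem.Dict.mk data
  let hashtag_dict : PySem.Dict String (PySem.Dict String (PySem.Dict String Int)) :=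
    d.keys.foldl (fun hashtag_dict id =>
      let row := d.getD id []
      let target := (PySem.List.pyGet? row 0).getD ""   -- in range under Pre_
      let hashtags := (PySem.List.pyGet? row 2).getD ""
      let stance := (PySem.List.pyGet? row 4).getD ""
      -- if len(hashtags) == 0: hashtags = {"NONE"}
      let hts : List String :=
        if PySem.Str.len hashtags == 0 then ["NONE"]
        else hashtags.toList.map (fun c => String.mk [c])
      hts.foldl (fun hashtag_dict ht =>
        let hashtag_dict := if !hashtag_dict.contains ht then hashtag_dict.insert ht PySem.Dict.empty else hashtag_dict
        let m1 := hashtag_dict.getD ht PySem.Dict.empty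
        let m1 := if !m1.contains target then m1.insert target PySem.Dict.empty else m1
        let m2 := m1.getD target PySem.Dict.empty
        let m2 := if !m2.contains stance then m2.insert stance 0 else m2
        let m2 := m2.insert stance (m2.getD stance 0 + 1)      -- hashtag_dict[ht][target][stance] += 1
        hashtag_dict.insert ht (m1.insert target m2)) hashtag_dict) PySem.Dict.empty
  hashtag_dict.items.map (fun p => (p.1, p.2.items.map (fun q => (q.1, q.2.items))))

-- ===== PORT B =====
-- transliteration of Source B: flatten to triples, count flat, reshape (setdefault chain written
-- functionally: Dict.insert overwrites in place exactly like the Python mutation through the alias)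
def get_hashtag_dict_alt (data : List (String × List String)) : List (String × List (String × List (String × Int))) :=
  let d : PySem.Dict String (List String) := PySem.Dict.mk data
  let triples : List (String × String × String) :=
    d.keys.foldl (fun triples id =>
      let row := d.getD id []
      let hts : List String :=
        if PySem.Str.len ((PySem.List.pyGet? row 2).getD "") > 0
        then ((PySem.List.pyGet? row 2).getD "").toList.map (fun c => String.mk [c])
        else ["NONE"]
      hts.foldl (fun triples ht =>
        triples ++ [(ht, (PySem.List.pyGet? row 0).getD "", (PySem.List.pyGet? row 4).getD "")]) triples) []
  let counts : PySem.Dict (String × String × String) Int :=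
    triples.foldl (fun counts t => counts.insert t (counts.getD t 0 + 1)) PySem.Dict.empty
  let nested : PySem.Dict String (PySem.Dict String (PySem.Dict String Int)) :=
    counts.items.foldl (fun nested p =>
      let m1 := nested.getD p.1.1 PySem.Dict.empty
      let m2 := m1.getD p.1.2.1 PySem.Dict.empty
      nested.insert p.1.1 (m1.insert p.1.2.1 (m2.insert p.1.2.2 p.2))) PySem.Dict.empty
  nested.items.map (fun p => (p.1, p.2.items.map (fun q => (q.1, q.2.items))))

-- ===== PRECONDITION & SPEC =====
-- Pre_ excludes rows with fewer than 5 entries (Python A raises IndexError on data[id][4]) and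
-- association lists with duplicate keys (they are not the image of any Python dict under the type convention).
def Pre_get_hashtag_dict (data : List (String × List String)) : Prop :=
  (data.map Prod.fst).Nodup ∧ ∀ p ∈ data, 5 ≤ p.2.length
instance (data : List (String × List String)) : Decidable (Pre_get_hashtag_dict data) := by
  unfold Pre_get_hashtag_dict; infer_instance
def pvWitness_get_hashtag_dict : (List (String × List String)) :=
  [("1", ["atheism", "", "ab", "", "FAVOR"]), ("2", ["atheism", "", "", "", "AGAINST"])]
def Spec_get_hashtag_dict (data : List (String × List String)) (out : List (String × List (String × List (String × Int)))) : Prop := out = get_hashtag_dict_alt data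
instance (data : List (String × List String)) (out : List (String × List (String × List (String × Int)))) : Decidable (Spec_get_hashtag_dict data out) := by unfold Spec_get_hashtag_dict; infer_instance

-- ===== CLAIM (what is proved, stated in full; the proofs are below) =====
def Claim_equal_get_hashtag_dict : Prop := ∀ (data : List (String × List String)), Dom_get_hashtag_dict data → Pre_get_hashtag_dict data → Spec_get_hashtag_dict data (get_hashtag_dict data)

-- ===== LEMMAS AND PROOFS =====

-- the common currency of the proof: the stream of (hashtag, target, stance) triples both programs emit
abbrev pvTrip := String × String × String
abbrev pvN3 := PySem.Dict String (PySem.Dict String (PySem.Dict String Int))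

def pvRowTriples (row : List String) : List pvTrip :=
  (if PySem.Str.len ((PySem.List.pyGet? row 2).getD "") == 0 then ["NONE"]
   else ((PySem.List.pyGet? row 2).getD "").toList.map (fun c => String.mk [c])).map
    (fun ht => (ht, (PySem.List.pyGet? row 0).getD "", (PySem.List.pyGet? row 4).getD ""))

def pvTriples (data : List (String × List String)) : List pvTrip :=
  (PySem.Dict.mk data).keys.flatMap (fun id => pvRowTriples ((PySem.Dict.mk data).getD id []))

-- writing count c at path k, A's increment, path lookup, path existence
def pvStep (n : pvN3) (k : pvTrip) (c : Int) : pvN3 :=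
  n.insert k.1 ((n.getD k.1 PySem.Dict.empty).insert k.2.1
    (((n.getD k.1 PySem.Dict.empty).getD k.2.1 PySem.Dict.empty).insert k.2.2 c))
def pvLook (n : pvN3) (k : pvTrip) : Int :=
  ((n.getD k.1 PySem.Dict.empty).getD k.2.1 PySem.Dict.empty).getD k.2.2 0
def pvHas (n : pvN3) (k : pvTrip) : Prop :=
  n.contains k.1 = true ∧ (n.getD k.1 PySem.Dict.empty).contains k.2.1 = true ∧
    ((n.getD k.1 PySem.Dict.empty).getD k.2.1 PySem.Dict.empty).contains k.2.2 = true
def pvInc (n : pvN3) (k : pvTrip) : pvN3 := pvStep n k (pvLook n k + 1)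
def pvReshape (l : List (pvTrip × Int)) : pvN3 :=
  l.foldl (fun n p => pvStep n p.1 p.2) PySem.Dict.empty
def pvToNested (n : pvN3) : List (String × List (String × List (String × Int))) :=
  n.items.map (fun p => (p.1, p.2.items.map (fun q => (q.1, q.2.items))))

-- Dict-level fact: two in-place inserts at distinct keys commute when the first key is already present
theorem pv_insert_comm {κ ν : Type} [BEq κ] [LawfulBEq κ] (d : PySem.Dict κ ν) (a b : κ) (x y : ν)
    (ha : d.contains a = true) (hab : a ≠ b) :
    (d.insert a x).insert b y = (d.insert b y).insert a x := by
  apply PySem.Dict.ext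
  have hba : (b == a) = false := by simp; exact fun h => hab h.symm
  have hcb : (d.insert a x).contains b = d.contains b := by
    rw [PySem.Dict.contains_insert]; simp [hba]
  have hca : (d.insert b y).contains a = true := by
    rw [PySem.Dict.contains_insert]; simp [ha]
  by_cases hb : d.contains b = true
  · rw [PySem.Dict.items_insert_of_contains _ y (by rw [hcb]; exact hb),
        PySem.Dict.items_insert_of_contains _ x ha,
        PySem.Dict.items_insert_of_contains _ x hca,
        PySem.Dict.items_insert_of_contains _ y hb, List.map_map, List.map_map]
    apply List.map_congr_left
    intro p _
    by_cases h1 : (p.1 == a) = true <;> by_cases h2 : (p.1 == b) = true <;> simp_all [beq_iff_eq]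
  · rw [PySem.Dict.items_insert_of_not_contains _ y (by rw [hcb]; simpa using hb),
        PySem.Dict.items_insert_of_contains _ x ha,
        PySem.Dict.items_insert_of_contains _ x hca,
        PySem.Dict.items_insert_of_not_contains _ y (by simpa using hb),
        List.map_append]
    simp [hba]

-- the pvStep / pvLook / pvHas calculus
theorem pvStep_step_self (n : pvN3) (k : pvTrip) (c v : Int) :
    pvStep (pvStep n k c) k v = pvStep n k v := by
  simp [pvStep, PySem.Dict.getD_insert_self, PySem.Dict.insert_insert_self]

theorem pvLook_step_self (n : pvN3) (k : pvTrip) (c : Int) :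
    pvLook (pvStep n k c) k = c := by
  simp [pvStep, pvLook, PySem.Dict.getD_insert_self]

theorem pvLook_step_ne (n : pvN3) (k k' : pvTrip) (c : Int) (h : k ≠ k') :
    pvLook (pvStep n k' c) k = pvLook n k := by
  obtain ⟨a, t, s⟩ := k; obtain ⟨a', t', s'⟩ := k'
  by_cases h1 : a = a'
  · by_cases h2 : t = t'
    · have h3 : s ≠ s' := by rintro rfl; subst h1 h2; exact h rfl
      subst h1 h2
      simp [pvStep, pvLook, PySem.Dict.getD_insert, h3]
    · subst h1
      simp [pvStep, pvLook, PySem.Dict.getD_insert, h2]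
  · simp [pvStep, pvLook, PySem.Dict.getD_insert, h1]

theorem pvHas_step_self (n : pvN3) (k : pvTrip) (c : Int) : pvHas (pvStep n k c) k := by
  refine ⟨?_, ?_, ?_⟩ <;>
    simp [pvStep, PySem.Dict.getD_insert_self, PySem.Dict.contains_insert_self]

theorem pvHas_step_mono (n : pvN3) (k k' : pvTrip) (c : Int) (h : pvHas n k) :
    pvHas (pvStep n k' c) k := by
  obtain ⟨a, t, s⟩ := k; obtain ⟨a', t', s'⟩ := k'
  obtain ⟨h1, h2, h3⟩ := h
  simp only at h1 h2 h3
  by_cases ha : a = a'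
  · subst ha
    by_cases ht : t = t'
    · subst ht
      refine ⟨?_, ?_, ?_⟩ <;>
        simp [pvStep, PySem.Dict.getD_insert, PySem.Dict.contains_insert, h1, h2, h3]
    · refine ⟨?_, ?_, ?_⟩ <;>
        simp [pvStep, PySem.Dict.getD_insert, PySem.Dict.contains_insert, ht, h1, h2, h3]
  · refine ⟨?_, ?_, ?_⟩ <;>
      simp [pvStep, PySem.Dict.getD_insert, PySem.Dict.contains_insert, ha, h1, h2, h3]

theorem pvStep_comm (n : pvN3) (k k' : pvTrip) (v c : Int) (hne : k ≠ k') (hk : pvHas n k) :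
    pvStep (pvStep n k v) k' c = pvStep (pvStep n k' c) k v := by
  obtain ⟨a, t, s⟩ := k; obtain ⟨a', t', s'⟩ := k'
  obtain ⟨h1, h2, h3⟩ := hk
  simp only at h1 h2 h3
  by_cases ha : a = a'
  · subst ha
    by_cases ht : t = t'
    · subst ht
      have hs : s ≠ s' := by rintro rfl; exact hne rfl
      simp only [pvStep, PySem.Dict.getD_insert_self, PySem.Dict.insert_insert_self,
        PySem.Dict.getD_insert, if_pos rfl]
      rw [pv_insert_comm _ _ _ _ _ h3 hs]
    · have ht' : ¬ t' = t := fun hh => ht hh.symm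
      simp only [pvStep, PySem.Dict.getD_insert_self, PySem.Dict.insert_insert_self,
        PySem.Dict.getD_insert, if_pos rfl, if_neg ht, if_neg ht']
      rw [pv_insert_comm _ _ _ _ _ h2 ht]
  · have ha' : ¬ a' = a := fun hh => ha hh.symm
    simp only [pvStep, PySem.Dict.getD_insert, if_neg ha, if_neg ha']
    rw [pv_insert_comm _ _ _ _ _ h1 ha]

-- reshaping a flat (triple, count) list
theorem pvReshape_append (l : List (pvTrip × Int)) (k : pvTrip) (c : Int) :
    pvReshape (l ++ [(k, c)]) = pvStep (pvReshape l) k c := by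
  simp [pvReshape, List.foldl_append]

theorem pvHas_reshape_of_mem (l : List (pvTrip × Int)) (k : pvTrip) (h : k ∈ l.map Prod.fst) :
    pvHas (pvReshape l) k := by
  induction l using List.reverseRecOn with
  | nil => simp at h
  | append_singleton l p ih =>
    rw [show l ++ [p] = l ++ [(p.1, p.2)] by simp, pvReshape_append]
    by_cases hk : k = p.1
    · subst hk; exact pvHas_step_self _ _ _
    · have : k ∈ l.map Prod.fst := by
        simp at h; rcases h with h | h
        · simp [h]
        · exact absurd h hk
      exact pvHas_step_mono _ _ _ _ (ih this)

theorem pvLook_reshape_not_mem (l : List (pvTrip × Int)) (k : pvTrip) (h : k ∉ l.map Prod.fst) :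
    pvLook (pvReshape l) k = 0 := by
  induction l using List.reverseRecOn with
  | nil => simp [pvReshape, pvLook]
  | append_singleton l p ih =>
    rw [show l ++ [p] = l ++ [(p.1, p.2)] by simp, pvReshape_append]
    simp only [List.map_append, List.map_cons, List.mem_append] at h
    push_neg at h
    rw [pvLook_step_ne _ _ _ _ (by simpa using h.2), ih h.1]

theorem pvReshape_bump (l : List (pvTrip × Int)) (k : pvTrip)
    (hnd : (l.map Prod.fst).Nodup) (hk : k ∈ l.map Prod.fst) :
    pvReshape (l.map (fun p => if p.1 = k then (p.1, p.2 + 1) else p)) = pvInc (pvReshape l) k := by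
  induction l using List.reverseRecOn with
  | nil => simp at hk
  | append_singleton l p ih =>
    rw [List.map_append] at hnd
    have hnd' : (l.map Prod.fst).Nodup := (List.nodup_append.mp hnd).1
    rw [List.map_append]
    by_cases hp : p.1 = k
    · have hkl : k ∉ l.map Prod.fst := by
        subst hp
        have h : (p.1 :: l.map Prod.fst).Nodup :=
          List.nodup_append_comm.mp (by simpa using hnd)
        exact (List.nodup_cons.mp h).1
      have hmapid : l.map (fun p => if p.1 = k then (p.1, p.2 + 1) else p) = l := by
        conv_rhs => rw [← List.map_id l]
        apply List.map_congr_left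
        intro x hx
        have hxk : x.1 ≠ k := fun hh => hkl (hh ▸ List.mem_map_of_mem hx)
        simp [hxk, id]
      have hsing : [p].map (fun p => if p.1 = k then (p.1, p.2 + 1) else p) = [(k, p.2 + 1)] := by
        simp [hp]
      rw [hmapid, hsing, pvReshape_append,
          show l ++ [p] = l ++ [(k, p.2)] by rw [← hp], pvReshape_append, pvInc,
          pvLook_step_self, pvStep_step_self]
    · have hkl : k ∈ l.map Prod.fst := by
        rcases (by simpa using hk : k ∈ l.map Prod.fst ∨ k = p.1) with h | h
        · exact h
        · exact absurd h.symm hp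
      have hsing : [p].map (fun p => if p.1 = k then (p.1, p.2 + 1) else p) = [(p.1, p.2)] := by
        simp [hp]
      rw [hsing, pvReshape_append, ih hnd' hkl,
          show l ++ [p] = l ++ [(p.1, p.2)] by simp, pvReshape_append, pvInc, pvInc,
          pvLook_step_ne _ _ _ _ (fun hh => hp hh.symm)]
      · exact pvStep_comm _ _ _ _ _ (fun hh => hp hh.symm) (pvHas_reshape_of_mem _ _ hkl)

-- the crux: reshaping the flat counter of L equals the incremental build over L
theorem pv_crux (L : List pvTrip) :
    pvReshape ((PySem.Set.ofList L).map (fun k => (k, (L.count k : Int)))) =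
      L.foldl pvInc PySem.Dict.empty := by
  induction L using List.reverseRecOn with
  | nil => rfl
  | append_singleton L k ih =>
    have hfst : (Prod.fst ∘ fun j : pvTrip => (j, (L.count j : Int))) = id := by
      funext j; rfl
    have hnd : ((PySem.Set.ofList L).map (fun j => (j, (L.count j : Int)))).map Prod.fst
        = PySem.Set.ofList L := by
      rw [List.map_map, hfst, List.map_id]
    have hofl : PySem.Set.ofList (L ++ [k]) = PySem.Set.add (PySem.Set.ofList L) k := by
      simp [PySem.Set.ofList, List.foldl_append]
    rw [List.foldl_append, hofl]
    by_cases hmem : k ∈ L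
    · have hcont : (PySem.Set.ofList L).contains k = true :=
        List.elem_eq_true_of_mem ((PySem.Set.mem_ofList L k).mpr hmem)
      rw [show PySem.Set.add (PySem.Set.ofList L) k = PySem.Set.ofList L by
        unfold PySem.Set.add; rw [hcont]; simp]
      have hmap : (PySem.Set.ofList L).map (fun j => (j, ((L ++ [k]).count j : Int))) =
          ((PySem.Set.ofList L).map (fun j => (j, (L.count j : Int)))).map
            (fun p => if p.1 = k then (p.1, p.2 + 1) else p) := by
        rw [List.map_map]
        apply List.map_congr_left
        intro j _
        by_cases hj : j = k
        · subst hj; simp [List.count_append]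
        · have hj' : ¬ k = j := fun hh => hj hh.symm
          simp [Function.comp, hj, hj', List.count_append, List.count_cons]
      have hnd2 : (((PySem.Set.ofList L).map (fun j => (j, (L.count j : Int)))).map Prod.fst).Nodup := by
        rw [hnd]; exact PySem.Set.nodup_ofList L
      have hmem2 : k ∈ ((PySem.Set.ofList L).map (fun j => (j, (L.count j : Int)))).map Prod.fst := by
        rw [hnd]; exact (PySem.Set.mem_ofList L k).mpr hmem
      rw [hmap, pvReshape_bump _ _ hnd2 hmem2, ih]
      simp [List.foldl]
    · have hcont : (PySem.Set.ofList L).contains k = false := by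
        rcases h : (PySem.Set.ofList L).contains k with _ | _
        · rfl
        · exact absurd ((PySem.Set.mem_ofList L k).mp (List.mem_of_elem_eq_true h)) hmem
      rw [show PySem.Set.add (PySem.Set.ofList L) k = PySem.Set.ofList L ++ [k] by
        unfold PySem.Set.add; rw [hcont]; simp]
      rw [List.map_append]
      have h0 : List.count k L = 0 := List.count_eq_zero.mpr hmem
      have hck : (((L ++ [k]).count k : Nat) : Int) = 1 := by
        simp [List.count_append, h0]
      have hmap : (PySem.Set.ofList L).map (fun j => (j, ((L ++ [k]).count j : Int))) =
          (PySem.Set.ofList L).map (fun j => (j, (L.count j : Int))) := by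
        apply List.map_congr_left
        intro j hj
        have hjk : ¬ j = k := fun hh => hmem (hh ▸ (PySem.Set.mem_ofList L j).mp hj)
        have hjk' : ¬ k = j := fun hh => hjk hh.symm
        simp [List.count_append, List.count_cons, hjk, hjk']
      rw [hmap, show (List.map (fun j => (j, ((L ++ [k]).count j : Int))) [k]) = [(k, 1)] by
        simp [List.count_append, h0], pvReshape_append]
      simp only [List.foldl, pvInc]
      have hmem3 : k ∉ ((PySem.Set.ofList L).map (fun j => (j, (L.count j : Int)))).map Prod.fst := by
        rw [hnd]; exact fun hh => hmem ((PySem.Set.mem_ofList L k).mp hh)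
      rw [← ih, pvLook_reshape_not_mem _ _ hmem3]
      norm_num

-- A's loop body is pvInc; A is the pvInc-fold over the triple stream; B is the reshaped counter
theorem pvA_body (n : pvN3) (ht target stance : String) :
    (let hashtag_dict := if !n.contains ht then n.insert ht PySem.Dict.empty else n
     let m1 := hashtag_dict.getD ht PySem.Dict.empty
     let m1 := if !m1.contains target then m1.insert target PySem.Dict.empty else m1
     let m2 := m1.getD target PySem.Dict.empty
     let m2 := if !m2.contains stance then m2.insert stance 0 else m2
     let m2 := m2.insert stance (m2.getD stance 0 + 1)
     hashtag_dict.insert ht (m1.insert target m2)) = pvInc n (ht, target, stance) := by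
  simp only [pvInc, pvStep, pvLook]
  by_cases h1 : n.contains ht = true
  · simp only [h1, Bool.not_true, Bool.false_eq_true, if_false]
    by_cases h2 : (n.getD ht PySem.Dict.empty).contains target = true
    · simp only [h2, Bool.not_true, Bool.false_eq_true, if_false]
      by_cases h3 : ((n.getD ht PySem.Dict.empty).getD target PySem.Dict.empty).contains stance = true
      · simp [h3]
      · have hf3 : ((n.getD ht PySem.Dict.empty).getD target PySem.Dict.empty).contains stance = false := by
          simpa using h3
        simp [hf3, PySem.Dict.getD_insert_self, PySem.Dict.insert_insert_self,
          PySem.Dict.getD_of_not_contains]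
    · have hf2 : (n.getD ht PySem.Dict.empty).contains target = false := by simpa using h2
      simp [hf2, PySem.Dict.getD_insert_self, PySem.Dict.insert_insert_self,
        PySem.Dict.getD_of_not_contains, PySem.Dict.getD_empty, PySem.Dict.contains_empty]
  · have hf1 : n.contains ht = false := by simpa using h1
    simp [hf1, PySem.Dict.getD_insert_self, PySem.Dict.insert_insert_self,
      PySem.Dict.getD_of_not_contains, PySem.Dict.getD_empty, PySem.Dict.contains_empty]

theorem pv_foldl_flatMap (ks : List String) (g : String → List pvTrip) (n : pvN3) :
    ks.foldl (fun n id => (g id).foldl pvInc n) n = (ks.flatMap g).foldl pvInc n := by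
  induction ks generalizing n with
  | nil => rfl
  | cons k ks ih => simp [List.flatMap_cons, List.foldl_append, ih]

theorem pvA_eq (data : List (String × List String)) :
    get_hashtag_dict data = pvToNested ((pvTriples data).foldl pvInc PySem.Dict.empty) := by
  unfold get_hashtag_dict pvToNested pvTriples
  dsimp only
  congr 1
  congr 1
  rw [← pv_foldl_flatMap]
  apply PySem.List.foldl_congr_mem
  intro n id _
  rw [pvRowTriples, List.foldl_map]
  apply PySem.List.foldl_congr_mem
  intro m ht _
  exact pvA_body m ht _ _

theorem pv_if_flip (h : String) :
    (if PySem.Str.len h > 0 then h.toList.map (fun c => String.mk [c]) else ["NONE"]) =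
      (if PySem.Str.len h == 0 then ["NONE"] else h.toList.map (fun c => String.mk [c])) := by
  by_cases hz : h.toList.length = 0
  · simp [PySem.Str.len_eq, hz]
  · have h1 : 0 < h.length := Nat.pos_of_ne_zero (by simpa using hz)
    have h2 : h ≠ "" := fun hh => hz (by simp [hh])
    simp [PySem.Str.len_eq, h1, h2]

theorem pvB_rows (ks : List String) (row : String → List String) (acc : List pvTrip) :
    ks.foldl (fun triples id =>
      (if PySem.Str.len ((PySem.List.pyGet? (row id) 2).getD "") > 0
        then ((PySem.List.pyGet? (row id) 2).getD "").toList.map (fun c => String.mk [c])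
        else ["NONE"]).foldl
        (fun triples ht => triples ++
          [(ht, (PySem.List.pyGet? (row id) 0).getD "", (PySem.List.pyGet? (row id) 4).getD "")]) triples) acc
    = acc ++ ks.flatMap (fun id => pvRowTriples (row id)) := by
  induction ks generalizing acc with
  | nil => simp
  | cons k ks ih =>
    rw [List.foldl_cons, PySem.List.foldl_append_singleton_eq_map, ih, List.flatMap_cons,
      ← List.append_assoc]
    congr 2
    rw [pv_if_flip, pvRowTriples]

theorem pvB_eq (data : List (String × List String)) :
    get_hashtag_dict_alt data =
      pvToNested (pvReshape ((PySem.Set.ofList (pvTriples data)).map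
        (fun k => (k, ((pvTriples data).count k : Int))))) := by
  unfold get_hashtag_dict_alt pvToNested pvReshape pvTriples
  dsimp only
  rw [pvB_rows, List.nil_append, PySem.Dict.foldl_insert_getD_add_one_eq_counter,
    PySem.Dict.items_counter]
  congr 1

-- ===== VERDICT (by name: the statement is the Claim_ definition above) =====
theorem get_hashtag_dict_spec : Claim_equal_get_hashtag_dict := by
  intro data _ _
  unfold Spec_get_hashtag_dict
  rw [pvA_eq, pvB_eq, pv_crux]
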